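-- pv_equiv track=rewrite | github.com/roccoho/receipt_scanner | get_info.py | last_index_of_spaced_words
-- ===== SOURCE A (Python) =====
-- def last_index_of_spaced_words(word_found, b_text):
--     word_list = word_found.split()
--     for i in range(len(b_text)-len(word_list)+1):
--         for j in range(len(word_list)):
--             if b_text[i+j].lower() != word_list[j].lower():
--                 break
--         else:
--             return i+len(word_list)-1
-- ===== SOURCE B (Python) =====
-- def last_index_of_spaced_words(word_found, b_text):
--     # Rabin-Karp over lowercased token sequences: tokens are hashed once,
--     # a rolling window hash filters candidate positions, exact slice
--     # comparison confirms a hit (so collisions can never change the answer).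
--     pat = [w.lower() for w in word_found.split()]
--     if not pat:
--         return None
--     text = [w.lower() for w in b_text]
--     m = len(pat)
--     n = len(text)
--     if n < m:
--         return None
--
--     def tok_hash(tok):
--         v = 0
--         for ch in tok:
--             v = v * 131 + ord(ch)
--         return v
--
--     thash = [tok_hash(w) for w in text]
--     phash = 0
--     for w in pat:
--         phash = phash * 1000003 + tok_hash(w)
--     whash = 0
--     for x in thash[:m]:
--         whash = whash * 1000003 + x
--     power = 1000003 ** (m - 1)
--     k = 0
--     r = n - m
--     while True:
--         if whash == phash and text[k:k + m] == pat:
--             return k + m - 1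
--         if r == 0:
--             return None
--         whash = (whash - thash[k] * power) * 1000003 + thash[k + m]
--         k += 1
--         r -= 1
-- ===== Notes on version B (the rewrite author's own statement) =====
-- stated objective: faster
-- what changed: Replaces the nested positional token-by-token comparison (which re-lowercases both tokens on every comparison) by Rabin-Karp: tokens are lowercased and hashed once, a rolling window hash filters candidate positions, and a verifying slice comparison confirms a hit.
-- intended difference: When word_found splits into no tokens (empty or all-whitespace), A returns -1 — an accidental i+len(word_list)-1 with an empty pattern, not a valid position — while B returns None, the intended 'no match' result. — e.g. on last_index_of_spaced_words("", ["a"]): A returns some (-1), B returns none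
import Mathlib
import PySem

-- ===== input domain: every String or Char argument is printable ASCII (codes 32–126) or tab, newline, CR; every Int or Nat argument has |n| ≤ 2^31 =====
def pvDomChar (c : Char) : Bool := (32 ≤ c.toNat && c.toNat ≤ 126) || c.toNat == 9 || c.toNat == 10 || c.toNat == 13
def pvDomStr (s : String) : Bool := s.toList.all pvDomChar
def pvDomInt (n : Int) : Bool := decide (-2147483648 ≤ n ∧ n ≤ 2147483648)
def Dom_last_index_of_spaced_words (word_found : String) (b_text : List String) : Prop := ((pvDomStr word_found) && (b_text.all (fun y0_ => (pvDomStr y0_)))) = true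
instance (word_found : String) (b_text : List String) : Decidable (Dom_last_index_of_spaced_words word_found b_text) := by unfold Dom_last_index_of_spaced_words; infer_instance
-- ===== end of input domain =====

-- ===== PORT A =====
-- B replaces A's nested positional comparison with Rabin-Karp over lowercased, pre-hashed
-- token sequences (hits are verified by a slice comparison); on a token-less word_found
-- A returns -1 while B returns none (stated as the intended difference D_ below).
def pvA_matchAt (word_list b_text : List String) (i : Int) : Bool :=
  (PySem.List.pyRange 0 (word_list.length : Int) 1).all (fun j =>
    PySem.Str.lower (PySem.List.pyGetD b_text (i + j) "") ==
      PySem.Str.lower (PySem.List.pyGetD word_list j ""))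

def pvA_scan (word_list b_text : List String) : List Int → Option Int
  | [] => none
  | i :: rest =>
      if pvA_matchAt word_list b_text i then some (i + (word_list.length : Int) - 1)
      else pvA_scan word_list b_text rest

def last_index_of_spaced_words (word_found : String) (b_text : List String) : Option Int :=
  let word_list := PySem.Str.split₀ word_found
  pvA_scan word_list b_text
    (PySem.List.pyRange 0 ((b_text.length : Int) - (word_list.length : Int) + 1) 1)

-- ===== PORT B =====
def pvB_tokHash (s : String) : Int :=
  s.toList.foldl (fun v ch => v * 131 + (ch.toNat : Int)) 0

def pvB_hseq (xs : List Int) : Int :=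
  xs.foldl (fun a x => a * 1000003 + x) 0

def pvB_loop (pat text : List String) (thash : List Int) (phash power : Int)
    (m : Nat) : Int → Nat → Nat → Option Int
  | whash, k, r =>
    if whash == phash &&
        PySem.List.slice text (some (k : Int)) (some ((k : Int) + (m : Int))) == pat then
      some ((k : Int) + (m : Int) - 1)
    else
      match r with
      | 0 => none
      | r + 1 =>
          pvB_loop pat text thash phash power m
            ((whash - PySem.List.pyGetD thash (k : Int) 0 * power) * 1000003 +
              PySem.List.pyGetD thash ((k : Int) + (m : Int)) 0)
            (k + 1) r

def last_index_of_spaced_words_alt (word_found : String) (b_text : List String) : Option Int :=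
  let pat := (PySem.Str.split₀ word_found).map PySem.Str.lower
  if pat.isEmpty then none
  else
    let text := b_text.map PySem.Str.lower
    let m := pat.length
    let n := text.length
    if n < m then none
    else
      let thash := text.map pvB_tokHash
      let phash := pvB_hseq (pat.map pvB_tokHash)
      let whash := pvB_hseq (thash.take m)
      let power := (1000003 : Int) ^ (m - 1)
      pvB_loop pat text thash phash power m whash 0 (n - m)

-- ===== PRECONDITION & SPEC =====
-- When word_found splits into no tokens (empty or all-whitespace), A returns the accidental
-- index -1 (i+len(word_list)-1 with an empty pattern); B returns none, the intended 'no match'.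
def D_last_index_of_spaced_words (word_found : String) (b_text : List String) : Prop :=
  PySem.Str.split₀ word_found = []
instance (word_found : String) (b_text : List String) : Decidable (D_last_index_of_spaced_words word_found b_text) := by unfold D_last_index_of_spaced_words; infer_instance

def Spec_last_index_of_spaced_words (word_found : String) (b_text : List String) (out : Option Int) : Prop := ¬ D_last_index_of_spaced_words word_found b_text → out = last_index_of_spaced_words_alt word_found b_text
instance (word_found : String) (b_text : List String) (out : Option Int) : Decidable (Spec_last_index_of_spaced_words word_found b_text out) := by unfold Spec_last_index_of_spaced_words; infer_instance

def pvDiffWitness_last_index_of_spaced_words : String × List String := ("", ["a"])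
def pvDiffWitnessOut_last_index_of_spaced_words : (Option Int) × (Option Int) := (some (-1), none)

-- ===== CLAIM (what is proved, stated in full; the proofs are below) =====
def Claim_unchanged_last_index_of_spaced_words : Prop := ∀ (word_found : String) (b_text : List String), Dom_last_index_of_spaced_words word_found b_text → Spec_last_index_of_spaced_words word_found b_text (last_index_of_spaced_words word_found b_text)
def Claim_changed_last_index_of_spaced_words : Prop := Dom_last_index_of_spaced_words (pvDiffWitness_last_index_of_spaced_words.1) (pvDiffWitness_last_index_of_spaced_words.2) ∧ D_last_index_of_spaced_words (pvDiffWitness_last_index_of_spaced_words.1) (pvDiffWitness_last_index_of_spaced_words.2) ∧ last_index_of_spaced_words (pvDiffWitness_last_index_of_spaced_words.1) (pvDiffWitness_last_index_of_spaced_words.2) = pvDiffWitnessOut_last_index_of_spaced_words.1 ∧ last_index_of_spaced_words_alt (pvDiffWitness_last_index_of_spaced_words.1) (pvDiffWitness_last_index_of_spaced_words.2) = pvDiffWitnessOut_last_index_of_spaced_words.2 ∧ pvDiffWitnessOut_last_index_of_spaced_words.1 ≠ pvDiffWitnessOut_last_index_of_spaced_words.2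
def Claim_exact_last_index_of_spaced_words : Prop := ∀ (word_found : String) (b_text : List String), Dom_last_index_of_spaced_words word_found b_text → D_last_index_of_spaced_words word_found b_text → last_index_of_spaced_words word_found b_text ≠ last_index_of_spaced_words_alt word_found b_text

-- ===== LEMMAS AND PROOFS =====

-- the common reference search: first k in [k, k+r] with good k, else none
def pvSearch (good : Nat → Bool) : Nat → Nat → Option Nat
  | k, r =>
    if good k then some k
    else match r with
      | 0 => none
      | r + 1 => pvSearch good (k + 1) r

-- the match predicate both programs decide at position k
def pvGood (LP LT : List String) (k : Nat) : Bool :=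
  (LT.drop k).take LP.length == LP

lemma pvA_matchAt_eq_good (wl bt : List String) (k : Nat)
    (h : k + wl.length ≤ bt.length) :
    pvA_matchAt wl bt (k : Nat) = pvGood (wl.map PySem.Str.lower) (bt.map PySem.Str.lower) k := by
  rw [Bool.eq_iff_iff]
  unfold pvA_matchAt pvGood
  rw [List.all_eq_true, beq_iff_eq]
  constructor
  · intro hall
    apply List.ext_getElem
    · simp; omega
    · intro j hj1 hj2
      simp only [List.length_map] at hj2
      have hj : j < wl.length := hj2
      have hmem : ((j : Nat) : Int) ∈ PySem.List.pyRange 0 (wl.length : Int) 1 := by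
        rw [PySem.List.mem_pyRange_one]; constructor
        · positivity
        · exact_mod_cast hj
      have := hall _ hmem
      rw [beq_iff_eq] at this
      have hkj : (k : Int) + (j : Int) = ((k + j : Nat) : Int) := by push_cast; ring
      rw [hkj, PySem.List.pyGetD_natCast, PySem.List.pyGetD_natCast] at this
      have h1 : bt.getD (k + j) "" = bt[k + j]'(by omega) := List.getD_eq_getElem _ _ (by omega)
      have h2 : wl.getD j "" = wl[j]'hj := List.getD_eq_getElem _ _ hj
      simp only [h1, h2] at this
      simp [List.getElem_map, List.getElem_take, List.getElem_drop, this]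
  · intro heq j hmem
    rw [PySem.List.mem_pyRange_one] at hmem
    obtain ⟨hj0, hjm⟩ := hmem
    obtain ⟨jn, rfl⟩ := Int.eq_ofNat_of_zero_le hj0
    have hj : jn < wl.length := by exact_mod_cast hjm
    rw [beq_iff_eq]
    have := congrArg (fun l => l[jn]?) heq
    simp only [List.getElem?_take, List.getElem?_drop, List.getElem?_map] at this
    have hkj : (k : Int) + (jn : Int) = ((k + jn : Nat) : Int) := by push_cast; ring
    rw [hkj, PySem.List.pyGetD_natCast, PySem.List.pyGetD_natCast]
    have h1 : bt.getD (k + jn) "" = bt[k + jn]'(by omega) := List.getD_eq_getElem _ _ (by omega)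
    have h2 : wl.getD jn "" = wl[jn]'hj := List.getD_eq_getElem _ _ hj
    rw [h1, h2]
    simp only [List.getElem?_eq_getElem (by omega : k + jn < bt.length),
      List.getElem?_eq_getElem hj] at this
    have hLP : jn < (wl.map PySem.Str.lower).length := by simpa using hj
    simp only [if_pos hLP] at this
    exact Option.some.inj this

lemma pvA_scan_eq (wl bt : List String) :
    ∀ (r k : Nat), k + wl.length + r = bt.length →
    pvA_scan wl bt (PySem.List.pyRange (k : Int) ((k : Int) + (r : Int) + 1) 1) =
      (pvSearch (pvGood (wl.map PySem.Str.lower) (bt.map PySem.Str.lower)) k r).map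
        (fun j => (j : Int) + (wl.length : Int) - 1) := by
  intro r
  induction r with
  | zero =>
    intro k hk
    rw [show (k : Int) + (0 : Nat) + 1 = (k : Int) + 1 by push_cast; ring,
      PySem.List.pyRange_one_singleton]
    unfold pvA_scan pvSearch
    rw [pvA_matchAt_eq_good wl bt k (by omega)]
    by_cases hg : pvGood (wl.map PySem.Str.lower) (bt.map PySem.Str.lower) k = true
    · simp [hg]
    · simp [hg, pvA_scan]
  | succ r ih =>
    intro k hk
    rw [PySem.List.pyRange_one_cons (by push_cast; omega)]
    unfold pvA_scan pvSearch
    rw [pvA_matchAt_eq_good wl bt k (by omega)]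
    by_cases hg : pvGood (wl.map PySem.Str.lower) (bt.map PySem.Str.lower) k = true
    · simp [hg]
    · simp only [hg, Bool.false_eq_true, if_false]
      have h2 := ih (k + 1) (by omega)
      rw [show (k : Int) + 1 = ((k + 1 : Nat) : Int) by push_cast; ring,
        show (k : Int) + ((r + 1 : Nat) : Int) + 1 = ((k + 1 : Nat) : Int) + ((r : Nat) : Int) + 1 by push_cast; ring]
      exact h2

lemma pvB_hseq_acc (B : Int) (l : List Int) (a : Int) :
    l.foldl (fun a x => a * B + x) a = a * B ^ l.length + l.foldl (fun a x => a * B + x) 0 := by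
  induction l generalizing a with
  | nil => simp
  | cons x t ih =>
    simp only [List.foldl_cons, List.length_cons]
    rw [ih (a * B + x), ih (0 * B + x)]
    ring

lemma pvB_roll (L : List Int) (m k : Nat) (hm : 1 ≤ m) (h : k + m < L.length) :
    pvB_hseq ((L.drop (k + 1)).take m) =
      (pvB_hseq ((L.drop k).take m) - L[k]'(by omega) * (1000003 : Int) ^ (m - 1)) * 1000003 +
        L[k + m]'h := by
  have hk : k < L.length := by omega
  have hmid : m - 1 ≤ (L.drop (k + 1)).length := by simp [List.length_drop]; omega
  set mid := (L.drop (k + 1)).take (m - 1) with hmiddef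
  have hWk : (L.drop k).take m = L[k]'hk :: mid := by
    rw [List.drop_eq_getElem_cons hk, show m = (m - 1) + 1 by omega, List.take_succ_cons]
  have hWk1 : (L.drop (k + 1)).take m = mid ++ [L[k + m]'h] := by
    conv_lhs => rw [show m = (m - 1) + 1 by omega]
    rw [List.take_add_one]
    congr 1
    rw [List.getElem?_drop, show k + 1 + (m - 1) = k + m by omega,
      List.getElem?_eq_getElem h]
    simp
  have hmidlen : mid.length = m - 1 := by
    simp [hmiddef, List.length_take, List.length_drop]; omega
  rw [hWk, hWk1]
  unfold pvB_hseq
  rw [List.foldl_cons, List.foldl_append, pvB_hseq_acc 1000003 mid (0 * 1000003 + L[k]'hk)]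
  simp only [List.foldl_cons, List.foldl_nil, hmidlen]
  ring

lemma pvB_cond_eq (LP LT : List String) (m : Nat) (hm : m = LP.length) (k : Nat) (whash : Int)
    (hw : whash = pvB_hseq (((LT.map pvB_tokHash).drop k).take m)) :
    ((whash == pvB_hseq (LP.map pvB_tokHash)) &&
      (PySem.List.slice LT (some (k : Int)) (some ((k : Int) + (m : Int))) == LP)) =
      pvGood LP LT k := by
  rw [PySem.List.slice_natCast_add]
  unfold pvGood
  rw [← hm]
  by_cases hg : (LT.drop k).take m = LP
  · have hwin : ((LT.map pvB_tokHash).drop k).take m = LP.map pvB_tokHash := by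
      rw [← List.map_drop, ← List.map_take, hg]
    simp [hg, hw, hwin]
  · simp [hg]

lemma pvB_loop_eq (LP LT : List String) (m : Nat) (hm : m = LP.length) (hm1 : 1 ≤ m) :
    ∀ (r k : Nat) (whash : Int), k + m + r = LT.length →
    whash = pvB_hseq (((LT.map pvB_tokHash).drop k).take m) →
    pvB_loop LP LT (LT.map pvB_tokHash) (pvB_hseq (LP.map pvB_tokHash))
        ((1000003 : Int) ^ (m - 1)) m whash k r =
      (pvSearch (pvGood LP LT) k r).map (fun j => (j : Int) + (m : Int) - 1) := by
  intro r
  induction r with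
  | zero =>
    intro k whash hk hw
    rw [pvB_loop, pvSearch, pvB_cond_eq LP LT m hm k whash hw]
    by_cases hg : pvGood LP LT k = true
    · simp [hg]
    · simp [hg]
  | succ r ih =>
    intro k whash hk hw
    rw [pvB_loop, pvSearch, pvB_cond_eq LP LT m hm k whash hw]
    by_cases hg : pvGood LP LT k = true
    · simp [hg]
    · simp only [hg, Bool.false_eq_true, if_false]
      have hk1 : k < (LT.map pvB_tokHash).length := by simp; omega
      have hk2 : k + m < (LT.map pvB_tokHash).length := by simp; omega
      have e1 : PySem.List.pyGetD (LT.map pvB_tokHash) (k : Int) 0 =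
          (LT.map pvB_tokHash)[k]'hk1 := by
        rw [PySem.List.pyGetD_natCast]
        exact List.getD_eq_getElem _ _ hk1
      have e2 : PySem.List.pyGetD (LT.map pvB_tokHash) ((k : Int) + (m : Int)) 0 =
          (LT.map pvB_tokHash)[k + m]'hk2 := by
        rw [show (k : Int) + (m : Int) = ((k + m : Nat) : Int) by push_cast; ring,
          PySem.List.pyGetD_natCast]
        exact List.getD_eq_getElem _ _ hk2
      rw [e1, e2]
      have hw' : (whash - (LT.map pvB_tokHash)[k]'hk1 * (1000003 : Int) ^ (m - 1)) * 1000003 +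
          (LT.map pvB_tokHash)[k + m]'hk2 =
          pvB_hseq (((LT.map pvB_tokHash).drop (k + 1)).take m) := by
        rw [pvB_roll (LT.map pvB_tokHash) m k hm1 hk2, hw]
      rw [hw']
      exact ih (k + 1) _ (by omega) rfl

-- the common value both ports are reduced to (for a nonempty pattern)
def pvRef (word_found : String) (b_text : List String) : Option Int :=
  let wl := PySem.Str.split₀ word_found
  if b_text.length < wl.length then none
  else
    (pvSearch (pvGood (wl.map PySem.Str.lower) (b_text.map PySem.Str.lower)) 0
        (b_text.length - wl.length)).map (fun j => (j : Int) + (wl.length : Int) - 1)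

lemma pvA_eq_ref (wf : String) (bt : List String) (h0 : PySem.Str.split₀ wf ≠ []) :
    last_index_of_spaced_words wf bt = pvRef wf bt := by
  simp only [last_index_of_spaced_words, pvRef]
  set wl := PySem.Str.split₀ wf with hwl
  have hlen : wl.length ≠ 0 := fun h => h0 (List.length_eq_zero_iff.mp h)
  by_cases h1 : bt.length < wl.length
  · rw [if_pos h1, PySem.List.pyRange_one_eq_nil (by omega)]
    rfl
  · rw [if_neg h1]
    have hcast : (0 : Int) = ((0 : Nat) : Int) := by norm_num
    have hrange : (bt.length : Int) - (wl.length : Int) + 1 =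
        ((0 : Nat) : Int) + ((bt.length - wl.length : Nat) : Int) + 1 := by
      rw [Nat.cast_sub (by omega : wl.length ≤ bt.length)]; push_cast; ring
    rw [hcast, hrange, pvA_scan_eq wl bt (bt.length - wl.length) 0 (by omega)]

lemma pvB_eq_ref (wf : String) (bt : List String) (h0 : PySem.Str.split₀ wf ≠ []) :
    last_index_of_spaced_words_alt wf bt = pvRef wf bt := by
  simp only [last_index_of_spaced_words_alt, pvRef, List.length_map]
  set wl := PySem.Str.split₀ wf with hwl
  have hne : (wl.map PySem.Str.lower).isEmpty = false := by
    rw [List.isEmpty_eq_false_iff]; simpa using h0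
  rw [hne]
  simp only [Bool.false_eq_true, if_false, List.length_map]
  by_cases h1 : bt.length < wl.length
  · rw [if_pos h1, if_pos h1]
  · rw [if_neg h1, if_neg h1]
    have := pvB_loop_eq (wl.map PySem.Str.lower) (bt.map PySem.Str.lower) wl.length
      (by simp) (List.length_pos_iff.mpr (by simpa using h0)) (bt.length - wl.length) 0
      (pvB_hseq (((bt.map PySem.Str.lower).map pvB_tokHash).take wl.length))
      (by simp; omega) (by rw [List.drop_zero])
    simpa using this

lemma pvA_empty (wf : String) (bt : List String) (h0 : PySem.Str.split₀ wf = []) :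
    last_index_of_spaced_words wf bt = some (-1) := by
  simp only [last_index_of_spaced_words, h0]
  rw [PySem.List.pyRange_one_cons (by simp)]
  simp [pvA_scan, pvA_matchAt]

lemma pvB_empty (wf : String) (bt : List String) (h0 : PySem.Str.split₀ wf = []) :
    last_index_of_spaced_words_alt wf bt = none := by
  simp [last_index_of_spaced_words_alt, h0]

-- ===== VERDICT (by name: the statement is the Claim_ definition above) =====
theorem last_index_of_spaced_words_spec : Claim_unchanged_last_index_of_spaced_words := by
  intro wf bt _
  unfold Spec_last_index_of_spaced_words D_last_index_of_spaced_words
  intro hd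
  rw [pvA_eq_ref wf bt hd, pvB_eq_ref wf bt hd]

theorem last_index_of_spaced_words_changed : Claim_changed_last_index_of_spaced_words := by
  unfold Claim_changed_last_index_of_spaced_words; decide

theorem last_index_of_spaced_words_tight : Claim_exact_last_index_of_spaced_words := by
  intro wf bt _ hd
  unfold D_last_index_of_spaced_words at hd
  rw [pvA_empty wf bt hd, pvB_empty wf bt hd]
  simp
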